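-- pv_equiv track=rewrite | github.com/rushk7/Keyword-Extraction | functions.py | get_capitalized
-- ===== SOURCE A (Python) =====
-- import string
--
-- def remove_punctuation(text):
--     """
--     Returns text free of punctuation marks
--     """
--     exclude = set(string.punctuation)
--     return ''.join([ch for ch in text if ch not in exclude])
--
-- def get_capitalized(text,candidate_keywords) :
--     """
--     Returns a 0/1 encoding indicating if any occurence of keyword included
--     capitalization
--     """
--     words_original = [remove_punctuation(w) for w in text.split()]
--     words_lower = [remove_punctuation(w) for w in text.lower().split()]
--
--     caps = []
--     for candidate in candidate_keywords:
--         occurences = [pos for pos,w in enumerate(words_lower) if w == candidate]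
--         if len(occurences)>0:
--             any_caps = sum([1 for o in occurences if words_original[o]!=words_lower[o]])
--             if any_caps>0:
--                 caps.append(1)
--             else:
--                 caps.append(0)
--         else:
--             caps.append(0)
--
--     return caps
-- ===== SOURCE B (Python) =====
-- import string
--
-- PUNCT = set(string.punctuation)
--
-- def remove_punctuation(text):
--     return ''.join([ch for ch in text if ch not in PUNCT])
--
-- def get_capitalized(text, candidate_keywords):
--     words_original = [remove_punctuation(w) for w in text.split()]
--     words_lower = [remove_punctuation(w) for w in text.lower().split()]
--     cap_set = {wl for wo, wl in zip(words_original, words_lower) if wo != wl}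
--     return [1 if c in cap_set else 0 for c in candidate_keywords]
-- ===== Notes on version B (the rewrite author's own statement) =====
-- stated objective: faster
-- what changed: Instead of scanning the word list once per candidate (collecting occurrence positions and counting capitalized ones), B builds in one pass the set of lowercased tokens whose original form differs from the lowercased form and answers every candidate by a single set-membership test.
import Mathlib
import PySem

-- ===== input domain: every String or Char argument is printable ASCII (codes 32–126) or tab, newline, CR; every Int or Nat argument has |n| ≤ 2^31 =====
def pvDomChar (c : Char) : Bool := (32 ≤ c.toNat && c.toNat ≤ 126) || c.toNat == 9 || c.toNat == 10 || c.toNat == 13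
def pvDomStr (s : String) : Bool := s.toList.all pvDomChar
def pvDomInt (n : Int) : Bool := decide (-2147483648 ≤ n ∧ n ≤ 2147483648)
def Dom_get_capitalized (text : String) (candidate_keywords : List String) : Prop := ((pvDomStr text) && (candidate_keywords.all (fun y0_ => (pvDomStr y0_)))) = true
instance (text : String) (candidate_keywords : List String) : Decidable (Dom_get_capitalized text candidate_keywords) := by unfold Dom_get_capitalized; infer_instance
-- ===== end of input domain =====

-- B builds the set of lowercased tokens that ever appeared capitalized once, then answers each
-- candidate by a membership test, replacing A's per-candidate occurrence scan and counting; objective: simpler.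

-- ===== PORT A =====
-- string.punctuation
def pvPunctuation : List Char := "!\"#$%&'()*+,-./:;<=>?@[\\]^_`{|}~".toList

def remove_punctuation (text : String) : String :=
  let exclude : PySem.Set Char := PySem.Set.ofList pvPunctuation
  -- ''.join([ch for ch in text if ch not in exclude]); ''.join of kept one-char strings = the filtered chars
  String.ofList (PySem.Chars.join [] ((text.toList.filter (fun ch => !(PySem.Set.contains exclude ch))).map (fun c => [c])))

def get_capitalized (text : String) (candidate_keywords : List String) : List Int :=
  let words_original := (PySem.Str.split₀ text).map remove_punctuation
  let words_lower := (PySem.Str.split₀ (PySem.Str.lower text)).map remove_punctuation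
  let caps := candidate_keywords.foldl (fun caps candidate =>
    let occurences := ((PySem.List.enumerate words_lower 0).filter (fun pw => pw.2 == candidate)).map (fun pw => pw.1)
    if occurences.length > 0 then
      -- words_original[o]: o comes from enumerate(words_lower) and the two word lists always have
      -- equal length (lowercasing preserves whitespace), so pyGet? is always `some`; `.getD ""` never fires
      let any_caps := (occurences.filter (fun o =>
        (PySem.List.pyGet? words_original o).getD "" != (PySem.List.pyGet? words_lower o).getD "")).length
      if any_caps > 0 then caps ++ [(1 : Int)] else caps ++ [(0 : Int)]
    else caps ++ [(0 : Int)]) []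
  caps

-- ===== PORT B =====
def get_capitalized_alt (text : String) (candidate_keywords : List String) : List Int :=
  let words_original := (PySem.Str.split₀ text).map remove_punctuation
  let words_lower := (PySem.Str.split₀ (PySem.Str.lower text)).map remove_punctuation
  let cap_set : PySem.Set String :=
    PySem.Set.ofList (((words_original.zip words_lower).filter (fun p => p.1 != p.2)).map (fun p => p.2))
  candidate_keywords.map (fun c => if PySem.Set.contains cap_set c then (1 : Int) else 0)

-- ===== PRECONDITION & SPEC =====
def Spec_get_capitalized (text : String) (candidate_keywords : List String) (out : List Int) : Prop := out = get_capitalized_alt text candidate_keywords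
instance (text : String) (candidate_keywords : List String) (out : List Int) : Decidable (Spec_get_capitalized text candidate_keywords out) := by unfold Spec_get_capitalized; infer_instance

-- ===== CLAIM (what is proved, stated in full; the proofs are below) =====
def Claim_equal_get_capitalized : Prop := ∀ (text : String) (candidate_keywords : List String), Dom_get_capitalized text candidate_keywords → Spec_get_capitalized text candidate_keywords (get_capitalized text candidate_keywords)

-- ===== LEMMAS AND PROOFS =====

-- lowering a character never changes whether it is whitespace
theorem pv_isspace_lowerChar (c : Char) :
    PySem.Chars.isspace (PySem.Chars.lowerChar c) = PySem.Chars.isspace c := by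
  unfold PySem.Chars.lowerChar
  by_cases h : PySem.Chars.isupper c = true
  · have hc : ('A' ≤ c ∧ c ≤ 'Z') := by
      simpa [PySem.Chars.isupper] using h
    have h1 : 65 ≤ c.toNat := hc.1
    have h2 : c.toNat ≤ 90 := hc.2
    have hv : (c.toNat + 32).isValidChar := by
      left; omega
    have ht : (Char.ofNat (c.toNat + 32)).toNat = c.toNat + 32 := by
      rw [Char.toNat_ofNat, if_pos hv]
    rw [if_pos h]
    simp only [PySem.Chars.isspace, ht]
    apply Bool.eq_iff_iff.mpr
    simp only [Bool.or_eq_true, Bool.and_eq_true, decide_eq_true_eq]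
    omega
  · simp [h]

-- split₀ commutes with lower
theorem pv_split₀_go_lower (s : List Char) : ∀ (cur : List Char) (acc : List (List Char)),
    PySem.Chars.split₀.go (PySem.Chars.lower s) (PySem.Chars.lower cur) (acc.map PySem.Chars.lower)
      = (PySem.Chars.split₀.go s cur acc).map PySem.Chars.lower := by
  induction s with
  | nil =>
    intro cur acc
    simp only [PySem.Chars.lower, List.map_nil]
    rw [PySem.Chars.split₀.go, PySem.Chars.split₀.go]
    by_cases h : cur.isEmpty = true
    · rw [if_pos (by simp_all), if_pos h]
      exact (List.map_reverse ..).symm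
    · rw [if_neg (by simp_all), if_neg h]
      simp [List.map_reverse, PySem.Chars.lower]
  | cons c rest ih =>
    intro cur acc
    simp only [PySem.Chars.lower, List.map_cons]
    rw [PySem.Chars.split₀.go, PySem.Chars.split₀.go]
    rw [pv_isspace_lowerChar]
    by_cases hs : PySem.Chars.isspace c = true
    · rw [if_pos hs, if_pos hs]
      by_cases he : cur.isEmpty
      · simp only [List.isEmpty_iff] at he
        subst he
        simpa [PySem.Chars.lower] using ih [] acc
      · have he' : (cur.map PySem.Chars.lowerChar).isEmpty = false := by
          simp_all [List.isEmpty_iff]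
        rw [if_neg (by simp [he']), if_neg he]
        have := ih [] ((cur.reverse :: acc))
        simpa [PySem.Chars.lower, List.map_reverse] using this
    · rw [if_neg hs, if_neg hs]
      have := ih (c :: cur) acc
      simpa [PySem.Chars.lower] using this

theorem pv_split₀_lower (s : List Char) :
    PySem.Chars.split₀ (PySem.Chars.lower s) = (PySem.Chars.split₀ s).map PySem.Chars.lower := by
  have := pv_split₀_go_lower s [] []
  simpa [PySem.Chars.split₀, PySem.Chars.lower] using this

theorem pv_len_split (text : String) :
    (PySem.Str.split₀ (PySem.Str.lower text)).length = (PySem.Str.split₀ text).length := by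
  have h1 : ((PySem.Str.split₀ (PySem.Str.lower text)).map String.toList) = PySem.Chars.split₀ (PySem.Str.lower text).toList := by
    simp
  have h2 : ((PySem.Str.split₀ text).map String.toList) = PySem.Chars.split₀ text.toList := by simp
  have := congrArg List.length h1
  rw [List.length_map] at this
  rw [this]
  have := congrArg List.length h2
  rw [List.length_map] at this
  rw [PySem.Str.toList_lower, pv_split₀_lower, List.length_map, this]

-- per-candidate agreement between A's counting test and B's set membership, for equal-length word lists
theorem pv_key (wo wl : List String) (h : wo.length = wl.length) (c : String) :
    (0 < ((((PySem.List.enumerate wl 0).filter (fun pw => pw.2 == c)).map (fun pw => pw.1)).filter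
        (fun o => (PySem.List.pyGet? wo o).getD "" != (PySem.List.pyGet? wl o).getD "")).length)
      ↔ PySem.Set.contains (PySem.Set.ofList (((wo.zip wl).filter (fun p => p.1 != p.2)).map (fun p => p.2))) c = true := by
  rw [List.length_filter_pos_iff]
  simp only [PySem.Set.contains, List.contains_iff_mem, PySem.Set.mem_ofList,
    List.mem_map, List.mem_filter, PySem.List.mem_enumerate_iff]
  constructor
  · rintro ⟨o, ⟨⟨pw, ⟨⟨k, hk, rfl⟩, hc⟩, rfl⟩, hne⟩⟩
    simp only [zero_add] at hc hne
    have hk' : k < wo.length := by omega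
    rw [PySem.List.pyGet?_natCast, PySem.List.pyGet?_natCast,
        List.getElem?_eq_getElem hk', List.getElem?_eq_getElem hk] at hne
    simp only [Option.getD_some, bne_iff_ne, ne_eq] at hne
    simp only [beq_iff_eq] at hc
    refine ⟨(wo[k], wl[k]), ⟨?_, ?_⟩, hc⟩
    · exact List.mem_iff_getElem.mpr ⟨k, by simp; omega, by simp⟩
    · simpa [bne_iff_ne] using hne
  · rintro ⟨p, ⟨hp, hne⟩, hc⟩
    obtain ⟨k, hklen, hpk⟩ := List.mem_iff_getElem.mp hp
    have hk : k < wl.length := by simp at hklen; omega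
    have hk' : k < wo.length := by omega
    rw [List.getElem_zip] at hpk
    subst hpk
    simp only [bne_iff_ne, ne_eq] at hne
    refine ⟨(k : Int), ⟨⟨(0 + (k : Int), wl[k]), ⟨⟨k, hk, rfl⟩, by simpa using hc⟩, by simp⟩, ?_⟩⟩
    rw [PySem.List.pyGet?_natCast, PySem.List.pyGet?_natCast,
        List.getElem?_eq_getElem hk', List.getElem?_eq_getElem hk]
    simpa [bne_iff_ne] using hne

theorem pv_main (text : String) (cks : List String) :
    get_capitalized text cks = get_capitalized_alt text cks := by
  simp only [get_capitalized, get_capitalized_alt]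
  set wo := (PySem.Str.split₀ text).map remove_punctuation with hwo
  set wl := (PySem.Str.split₀ (PySem.Str.lower text)).map remove_punctuation with hwl
  have hlen : wo.length = wl.length := by
    rw [hwo, hwl, List.length_map, List.length_map, pv_len_split]
  set g : String → Int := fun c =>
    if PySem.Set.contains (PySem.Set.ofList (((wo.zip wl).filter (fun p => p.1 != p.2)).map (fun p => p.2))) c then (1 : Int) else 0 with hg
  have hbody : ∀ (caps : List Int) (candidate : String),
      (let occurences := ((PySem.List.enumerate wl 0).filter (fun pw => pw.2 == candidate)).map (fun pw => pw.1)
       if occurences.length > 0 then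
         let any_caps := (occurences.filter (fun o =>
           (PySem.List.pyGet? wo o).getD "" != (PySem.List.pyGet? wl o).getD "")).length
         if any_caps > 0 then caps ++ [(1 : Int)] else caps ++ [(0 : Int)]
       else caps ++ [(0 : Int)])
      = caps ++ [g candidate] := by
    intro caps candidate
    simp only [hg]
    by_cases hocc : 0 < (((PySem.List.enumerate wl 0).filter (fun pw => pw.2 == candidate)).map (fun pw => pw.1)).length
    · rw [if_pos hocc]
      by_cases hany : 0 < ((((PySem.List.enumerate wl 0).filter (fun pw => pw.2 == candidate)).map (fun pw => pw.1)).filter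
          (fun o => (PySem.List.pyGet? wo o).getD "" != (PySem.List.pyGet? wl o).getD "")).length
      · rw [if_pos hany, if_pos ((pv_key wo wl hlen candidate).mp hany)]
      · rw [if_neg hany, if_neg (fun hc => hany ((pv_key wo wl hlen candidate).mpr hc))]
    · rw [if_neg hocc]
      have : ¬ PySem.Set.contains (PySem.Set.ofList (((wo.zip wl).filter (fun p => p.1 != p.2)).map (fun p => p.2))) candidate = true := by
        intro hc
        have := (pv_key wo wl hlen candidate).mpr hc
        have hle := List.length_filter_le
          (fun o => (PySem.List.pyGet? wo o).getD "" != (PySem.List.pyGet? wl o).getD "")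
          (((PySem.List.enumerate wl 0).filter (fun pw => pw.2 == candidate)).map (fun pw => pw.1))
        omega
      rw [if_neg this]
  have hfold : ∀ (l : List String) (acc : List Int),
      l.foldl (fun caps candidate =>
        let occurences := ((PySem.List.enumerate wl 0).filter (fun pw => pw.2 == candidate)).map (fun pw => pw.1)
        if occurences.length > 0 then
          let any_caps := (occurences.filter (fun o =>
            (PySem.List.pyGet? wo o).getD "" != (PySem.List.pyGet? wl o).getD "")).length
          if any_caps > 0 then caps ++ [(1 : Int)] else caps ++ [(0 : Int)]
        else caps ++ [(0 : Int)]) acc = acc ++ l.map g := by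
    intro l
    induction l with
    | nil => intro acc; simp
    | cons x xs ih =>
      intro acc
      rw [List.foldl_cons, hbody, ih, List.map_cons]
      simp
  simpa using hfold cks []

-- ===== VERDICT (by name: the statement is the Claim_ definition above) =====
theorem get_capitalized_spec : Claim_equal_get_capitalized := by
  intro text cks _
  exact pv_main text cks
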